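-- pv_equiv track=rewrite | github.com/fsantibanezleal/HackerRankFASL | Twin Arrays/Attemp1.py | twinArrays
-- ===== SOURCE A (Python) =====
-- def twinArrays(ar1, ar2):
--     outTwin = 0
--     # Complete this function
--     ar1ST = sorted((e,i) for i,e in enumerate(ar1))
--     ar2ST = sorted((e,i) for i,e in enumerate(ar2))
--
--     if ar1ST[0][1] != ar2ST[0][1]:
--         outTwin = ar1ST[0][0] + ar2ST[0][0]
--     else:
--         outTwin = min(ar1ST[0][0] + ar2ST[1][0], ar1ST[1][0] + ar2ST[0][0])
--     return outTwin
-- ===== SOURCE B (Python) =====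
-- def twinArrays(ar1, ar2):
--     def best_two(ar):
--         # one linear pass: smallest value with its first index, and the
--         # second-smallest value (counting multiplicity)
--         v1, j1 = ar[0], 0
--         v2 = None
--         for j, e in enumerate(ar[1:], 1):
--             if e < v1:
--                 v2, v1, j1 = v1, e, j
--             elif v2 is None or e < v2:
--                 v2 = e
--         return v1, j1, v2
--
--     v1, j1, u1 = best_two(ar1)
--     v2, j2, u2 = best_two(ar2)
--     if j1 != j2:
--         return v1 + v2
--     return min(v1 + u2, u1 + v2)
-- ===== Notes on version B (the rewrite author's own statement) =====
-- stated objective: faster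
-- what changed: replaces the two full sorts of (value,index) pairs with a single linear pass per array that tracks the smallest value with its first index and the second-smallest value
import Mathlib
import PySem

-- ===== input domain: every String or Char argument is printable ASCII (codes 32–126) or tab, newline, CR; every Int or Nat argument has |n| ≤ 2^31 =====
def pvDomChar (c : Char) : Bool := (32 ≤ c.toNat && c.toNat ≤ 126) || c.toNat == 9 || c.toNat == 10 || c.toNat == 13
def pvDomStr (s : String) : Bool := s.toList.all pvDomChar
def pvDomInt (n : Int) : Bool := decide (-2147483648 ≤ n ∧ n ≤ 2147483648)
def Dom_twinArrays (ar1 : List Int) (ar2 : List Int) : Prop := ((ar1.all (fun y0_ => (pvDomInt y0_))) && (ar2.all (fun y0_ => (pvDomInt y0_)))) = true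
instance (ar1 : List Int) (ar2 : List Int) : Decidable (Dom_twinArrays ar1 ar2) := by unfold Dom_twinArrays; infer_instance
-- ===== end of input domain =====

-- B replaces A's two sorts of (value,index) pairs by one linear pass per array
-- tracking the smallest value with its first index and the second-smallest value (faster).

-- ===== PORT A =====
-- A sorts the list of (element, index) pairs of each array (Python tuple order =
-- lexicographic) and combines the first one or two entries of each sorted list.
-- The pyGetD default (0, 0) stands for the IndexError Python raises on an
-- out-of-range [0]/[1] access; Pre_twinArrays excludes exactly those inputs.
def twinArrays (ar1 : List Int) (ar2 : List Int) : Int :=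
  let ar1ST := PySem.List.sorted2 ((PySem.List.enumerate ar1 0).map (fun p => (p.2, p.1))) Prod.fst Prod.snd
  let ar2ST := PySem.List.sorted2 ((PySem.List.enumerate ar2 0).map (fun p => (p.2, p.1))) Prod.fst Prod.snd
  if (PySem.List.pyGetD ar1ST 0 ((0 : Int), (0 : Int))).2 ≠ (PySem.List.pyGetD ar2ST 0 ((0 : Int), (0 : Int))).2 then
    (PySem.List.pyGetD ar1ST 0 ((0 : Int), (0 : Int))).1 + (PySem.List.pyGetD ar2ST 0 ((0 : Int), (0 : Int))).1
  else
    min ((PySem.List.pyGetD ar1ST 0 ((0 : Int), (0 : Int))).1 + (PySem.List.pyGetD ar2ST 1 ((0 : Int), (0 : Int))).1)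
        ((PySem.List.pyGetD ar1ST 1 ((0 : Int), (0 : Int))).1 + (PySem.List.pyGetD ar2ST 0 ((0 : Int), (0 : Int))).1)

-- ===== PORT B =====
-- state = (v1, j1, v2): smallest value so far, its first index, second-smallest value (None at start)
def bestTwoStep (s : Int × Int × Option Int) (p : Int × Int) : Int × Int × Option Int :=
  if p.2 < s.1 then (p.2, p.1, some s.1)
  else if (match s.2.2 with | none => true | some v2 => decide (p.2 < v2)) then (s.1, s.2.1, some p.2)
  else s

-- for j, e in enumerate(ar[1:], 1): …   starting from (ar[0], 0, None)
-- (the pyGetD default 0 stands for the IndexError Python raises on ar[0] of an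
-- empty list; Pre_twinArrays excludes that input)
def bestTwo (ar : List Int) : Int × Int × Option Int :=
  (PySem.List.enumerate (PySem.List.slice ar (some 1)) 1).foldl bestTwoStep
    (PySem.List.pyGetD ar 0 0, 0, none)

-- Option.getD 0 stands for the TypeError Python raises when v2 is still None
-- in the tied-index branch; Pre_twinArrays excludes exactly those inputs.
def twinArrays_alt (ar1 : List Int) (ar2 : List Int) : Int :=
  let b1 := bestTwo ar1
  let b2 := bestTwo ar2
  if b1.2.1 ≠ b2.2.1 then b1.1 + b2.1
  else min (b1.1 + b2.2.2.getD 0) (b1.2.2.getD 0 + b2.1)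

-- ===== PRECONDITION & SPEC =====
-- IsFirstMin xs j: position j holds the minimum of xs and is its first occurrence.
def IsFirstMin (xs : List Int) (j : Nat) : Prop :=
  j < xs.length ∧ (∀ k < xs.length, xs.getD j 0 ≤ xs.getD k 0) ∧ (∀ k < j, xs.getD j 0 < xs.getD k 0)

-- Pre_ excludes exactly the inputs on which Python A raises: an empty array
-- (IndexError on [0]), or both minima first occurring at the same index while
-- some array has fewer than 2 elements (IndexError on [1]).
def Pre_twinArrays (ar1 : List Int) (ar2 : List Int) : Prop :=
  ar1 ≠ [] ∧ ar2 ≠ [] ∧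
    ((2 ≤ ar1.length ∧ 2 ≤ ar2.length) ∨ ¬ ∃ j < ar1.length, IsFirstMin ar1 j ∧ IsFirstMin ar2 j)
instance (ar1 : List Int) (ar2 : List Int) : Decidable (Pre_twinArrays ar1 ar2) := by
  unfold Pre_twinArrays IsFirstMin; infer_instance

def pvWitness_twinArrays : List Int × List Int := ([1, 2], [3, 4])

def Spec_twinArrays (ar1 : List Int) (ar2 : List Int) (out : Int) : Prop := out = twinArrays_alt ar1 ar2
instance (ar1 : List Int) (ar2 : List Int) (out : Int) : Decidable (Spec_twinArrays ar1 ar2 out) := by unfold Spec_twinArrays; infer_instance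

-- ===== CLAIM (what is proved, stated in full; the proofs are below) =====
def Claim_equal_twinArrays : Prop := ∀ (ar1 : List Int) (ar2 : List Int), Dom_twinArrays ar1 ar2 → Pre_twinArrays ar1 ar2 → Spec_twinArrays ar1 ar2 (twinArrays ar1 ar2)

-- ===== LEMMAS AND PROOFS =====

-- the comparison sorted2 … Prod.fst Prod.snd uses (Python's lexicographic tuple <)
def pvLexBefore (a b : Int × Int) : Bool :=
  decide (a.1 < b.1) || (!decide (b.1 < a.1) && decide (a.2 < b.2))

lemma pv_sorted2_eq_foldl (l : List (Int × Int)) :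
    PySem.List.sorted2 l Prod.fst Prod.snd
      = l.foldl (fun acc x => PySem.List.insertBy pvLexBefore x acc) [] := rfl

-- first two entries of the (partially) sorted list, as B's scan state
def pvExtract (acc : List (Int × Int)) : Int × Int × Option Int :=
  ((acc.headD (0, 0)).1, (acc.headD (0, 0)).2, acc[1]?.map Prod.fst)

lemma pv_insertBy_ne_nil (x : Int × Int) (ys : List (Int × Int)) :
    PySem.List.insertBy pvLexBefore x ys ≠ [] := by
  cases ys with
  | nil => simp [PySem.List.insertBy]
  | cons h t => simp only [PySem.List.insertBy]; split <;> simp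

lemma pv_step (h1 : Int × Int) (rest : List (Int × Int)) (e j : Int)
    (hj : ∀ p ∈ h1 :: rest, p.2 < j) :
    pvExtract (PySem.List.insertBy pvLexBefore (e, j) (h1 :: rest))
      = bestTwoStep (pvExtract (h1 :: rest)) (j, e) := by
  have hj1 : h1.2 < j := hj h1 (by simp)
  have hb1 : pvLexBefore (e, j) h1 = decide (e < h1.1) := by
    simp only [pvLexBefore]
    by_cases h : e < h1.1 <;> by_cases h' : h1.1 < e <;>
      simp [h, h', show ¬ j < h1.2 by omega]
  cases rest with
  | nil =>
    simp only [PySem.List.insertBy, hb1]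
    by_cases h : e < h1.1 <;> simp [h, pvExtract, bestTwoStep]
  | cons h2 r2 =>
    have hj2 : h2.2 < j := hj h2 (by simp)
    have hb2 : pvLexBefore (e, j) h2 = decide (e < h2.1) := by
      simp only [pvLexBefore]
      by_cases h : e < h2.1 <;> by_cases h' : h2.1 < e <;>
        simp [h, h', show ¬ j < h2.2 by omega]
    simp only [PySem.List.insertBy, hb1, hb2]
    by_cases h : e < h1.1
    · simp [h, pvExtract, bestTwoStep]
    · by_cases h' : e < h2.1 <;> simp [h, h', pvExtract, bestTwoStep]

lemma pv_fold (t : List Int) : ∀ (j : Int) (acc : List (Int × Int)),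
    acc ≠ [] → (∀ p ∈ acc, p.2 < j) →
    (PySem.List.enumerate t j).foldl bestTwoStep (pvExtract acc)
      = pvExtract (((PySem.List.enumerate t j).map (fun p => (p.2, p.1))).foldl
          (fun acc x => PySem.List.insertBy pvLexBefore x acc) acc) := by
  induction t with
  | nil => intro j acc _ _; simp [PySem.List.enumerate]
  | cons x t ih =>
    intro j acc hne hj
    obtain ⟨h1, rest, rfl⟩ : ∃ h1 rest, acc = h1 :: rest := by
      cases acc with
      | nil => exact absurd rfl hne
      | cons a b => exact ⟨a, b, rfl⟩
    rw [PySem.List.enumerate_cons]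
    simp only [List.map_cons, List.foldl_cons]
    rw [← pv_step h1 rest x j hj]
    exact ih (j + 1) _ (pv_insertBy_ne_nil _ _)
      (fun p hp => by
        rcases (PySem.List.mem_insertBy _ _ _ _).1 hp with rfl | hp
        · omega
        · have := hj p hp; omega)

lemma pv_extract_sorted (ar : List Int) :
    pvExtract (PySem.List.sorted2 ((PySem.List.enumerate ar 0).map (fun p => (p.2, p.1))) Prod.fst Prod.snd)
      = bestTwo ar := by
  cases ar with
  | nil => rfl
  | cons x rest =>
    rw [pv_sorted2_eq_foldl, PySem.List.enumerate_cons]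
    simp only [List.map_cons, List.foldl_cons]
    have h := pv_fold rest 1 [(x, 0)] (by simp) (by simp)
    have hx : pvExtract [(x, (0 : Int))] = (x, 0, none) := rfl
    rw [hx] at h
    have hins : PySem.List.insertBy pvLexBefore (x, (0 : Int)) [] = [(x, 0)] := rfl
    rw [hins, zero_add, ← h]
    have hslice : PySem.List.slice (x :: rest) (some 1) = rest := by
      rw [PySem.List.slice_from _ (by norm_num)]; rfl
    simp [bestTwo, hslice, PySem.List.pyGetD_zero_cons]

lemma pv_access (s : List (Int × Int)) :
    PySem.List.pyGetD s 0 ((0 : Int), (0 : Int)) = ((pvExtract s).1, (pvExtract s).2.1)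
    ∧ (PySem.List.pyGetD s 1 ((0 : Int), (0 : Int))).1 = (pvExtract s).2.2.getD 0 := by
  match s with
  | [] => refine ⟨?_, ?_⟩ <;> rw [PySem.List.pyGetD_ofNat'] <;> rfl
  | [h] => refine ⟨?_, ?_⟩ <;> rw [PySem.List.pyGetD_ofNat'] <;> rfl
  | h :: h2 :: r => refine ⟨?_, ?_⟩ <;> rw [PySem.List.pyGetD_ofNat'] <;> rfl

lemma pv_main (ar1 ar2 : List Int) : twinArrays ar1 ar2 = twinArrays_alt ar1 ar2 := by
  have e1 := pv_extract_sorted ar1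
  have e2 := pv_extract_sorted ar2
  obtain ⟨a10, a11⟩ := pv_access (PySem.List.sorted2 ((PySem.List.enumerate ar1 0).map (fun p => (p.2, p.1))) Prod.fst Prod.snd)
  obtain ⟨a20, a21⟩ := pv_access (PySem.List.sorted2 ((PySem.List.enumerate ar2 0).map (fun p => (p.2, p.1))) Prod.fst Prod.snd)
  rw [e1] at a10 a11
  rw [e2] at a20 a21
  simp only [twinArrays, twinArrays_alt, a10, a11, a20, a21]

-- ===== VERDICT (by name: the statement is the Claim_ definition above) =====
theorem twinArrays_spec : Claim_equal_twinArrays := by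
  intro ar1 ar2 _ _
  unfold Spec_twinArrays
  exact pv_main ar1 ar2
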